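-- pv_equiv track=rewrite | github.com/zhuli19901106/leetcode-zhuli | algorithms/2001-2500/2444_count-subarrays-with-fixed-bounds_1_AC.py | countSubarraysOne
-- ===== SOURCE A (Python) =====
-- def countSubarraysOne(nums, x):
--     n = len(nums)
--     res = 0
--     i = 0
--     while i < n:
--         if nums[i] != x:
--             i += 1
--             continue
--
--         j = i
--         while j < n and nums[j] == x:
--             j += 1
--         k = j - i
--         res += k * (k + 1) // 2
--         i = j
--
--     return res
-- ===== SOURCE B (Python) =====
-- def countSubarraysOne(nums, x):
--     run = 0
--     res = 0
--     for v in nums: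
--         if v == x:
--             run += 1
--             res += run
--         else:
--             run = 0
--     return res
-- ===== Notes on version B (the rewrite author's own statement) =====
-- stated objective: simpler
-- what changed: Replaced the index-based outer while loop with an inner run-scanning while loop and the k*(k+1)//2 closed form by a single flat pass keeping a running consecutive count that is added to the result at each matching element.
import Mathlib
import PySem

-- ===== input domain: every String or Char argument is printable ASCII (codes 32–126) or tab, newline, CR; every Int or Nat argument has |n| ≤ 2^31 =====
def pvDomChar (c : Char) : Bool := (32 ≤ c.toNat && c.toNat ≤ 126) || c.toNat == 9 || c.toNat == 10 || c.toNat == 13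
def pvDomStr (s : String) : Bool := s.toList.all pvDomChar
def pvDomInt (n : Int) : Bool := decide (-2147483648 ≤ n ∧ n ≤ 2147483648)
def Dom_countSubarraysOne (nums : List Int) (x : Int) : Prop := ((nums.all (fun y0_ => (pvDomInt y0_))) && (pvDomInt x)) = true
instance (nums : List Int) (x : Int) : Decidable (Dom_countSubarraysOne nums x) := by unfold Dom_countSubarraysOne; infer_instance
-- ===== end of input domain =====

-- B replaces A's nested while-loops and k*(k+1)//2 closed form by one flat pass
-- with a running consecutive count (objective: simpler).


-- ===== PORT A =====
-- inner 'while j < n and nums[j] == x: j += 1'; returns the final j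
def csoInner (nums : List Int) (x : Int) (n j : Int) : Int :=
  if j < n ∧ PySem.List.pyGetD nums j 0 = x then
    csoInner nums x n (j + 1)
  else j
termination_by (n - j).toNat
decreasing_by omega

-- termination facts for the outer loop (cited by its decreasing_by)
theorem csoInner_ge (nums : List Int) (x : Int) (n j : Int) : j ≤ csoInner nums x n j := by
  unfold csoInner
  split
  · have := csoInner_ge nums x n (j + 1); omega
  · omega
termination_by (n - j).toNat
decreasing_by omega

theorem csoInner_gt (nums : List Int) (x : Int) (n i : Int)
    (h : i < n) (hx : PySem.List.pyGetD nums i 0 = x) : i + 1 ≤ csoInner nums x n i := by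
  rw [csoInner]
  simp only [h, hx, and_self, if_true]
  exact csoInner_ge nums x n (i + 1)

-- outer 'while i < n: …'
def csoOuter (nums : List Int) (x : Int) (n i res : Int) : Int :=
  if hi : i < n then
    if hx : PySem.List.pyGetD nums i 0 ≠ x then
      csoOuter nums x n (i + 1) res
    else
      let j := csoInner nums x n i
      let k := j - i
      csoOuter nums x n j (res + PySem.Int.floordiv (k * (k + 1)) 2)
  else res
termination_by (n - i).toNat
decreasing_by
  · omega
  · have := csoInner_gt nums x n i hi (by omega); omega

def countSubarraysOne (nums : List Int) (x : Int) : Int :=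
  csoOuter nums x nums.length 0 0

-- ===== PORT B =====
-- flat pass: 'for v in nums: if v == x: run += 1; res += run else: run = 0'
def csoGo (x : Int) : List Int → Int → Int → Int
  | [], _, res => res
  | v :: t, run, res =>
      if v = x then csoGo x t (run + 1) (res + (run + 1))
      else csoGo x t 0 res

def countSubarraysOne_alt (nums : List Int) (x : Int) : Int :=
  csoGo x nums 0 0

-- ===== PRECONDITION & SPEC =====
def Spec_countSubarraysOne (nums : List Int) (x : Int) (out : Int) : Prop := out = countSubarraysOne_alt nums x
instance (nums : List Int) (x : Int) (out : Int) : Decidable (Spec_countSubarraysOne nums x out) := by unfold Spec_countSubarraysOne; infer_instance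

-- ===== CLAIM (what is proved, stated in full; the proofs are below) =====
def Claim_equal_countSubarraysOne : Prop := ∀ (nums : List Int) (x : Int), Dom_countSubarraysOne nums x → Spec_countSubarraysOne nums x (countSubarraysOne nums x)

-- ===== LEMMAS AND PROOFS =====

-- length of the leading run of x's
def runLen (x : Int) : List Int → Nat
  | [] => 0
  | v :: t => if v = x then runLen x t + 1 else 0

-- triangular number as an Int
def tri : Nat → Int
  | 0 => 0
  | k + 1 => tri k + (k + 1)

theorem two_mul_tri (k : Nat) : 2 * tri k = (k : Int) * (k + 1) := by
  induction k with
  | zero => simp [tri]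
  | succ k ih => simp only [tri]; push_cast; push_cast at ih; ring_nf; ring_nf at ih; omega

theorem tri_eq_floordiv (k : Nat) : PySem.Int.floordiv ((k : Int) * ((k : Int) + 1)) 2 = tri k := by
  rw [← two_mul_tri k, PySem.Int.floordiv_eq_ediv_of_pos (by omega)]
  omega

theorem runLen_decomp (x : Int) (l : List Int) :
    l = List.replicate (runLen x l) x ++ l.drop (runLen x l) ∧
      (l.drop (runLen x l) = [] ∨ ∃ v t, l.drop (runLen x l) = v :: t ∧ v ≠ x) := by
  induction l with
  | nil => simp [runLen]
  | cons v t ih =>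
    by_cases hv : v = x
    · simp only [runLen, hv, if_true, List.replicate_succ, List.drop_succ_cons, List.cons_append]
      exact ⟨by rw [← ih.1], ih.2⟩
    · simp only [runLen, hv, if_false]
      exact ⟨rfl, Or.inr ⟨v, t, rfl, hv⟩⟩

-- B on a run of k x's: run and res advance as stated
theorem csoGo_replicate (x : Int) (k : Nat) (rest : List Int) (run res : Int) :
    csoGo x (List.replicate k x ++ rest) run res
      = csoGo x rest (run + k) (res + (k : Int) * run + tri k) := by
  induction k generalizing run res with
  | zero => simp [tri]
  | succ k ih =>
    simp only [List.replicate_succ, List.cons_append, csoGo]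
    rw [ih]
    have h2 : tri (k + 1) = tri k + ((k : Int) + 1) := rfl
    rw [h2]
    push_cast
    rw [(by ring : run + 1 + (k : Int) = run + ((k : Int) + 1)),
        (by ring : res + (run + 1) + (k : Int) * (run + 1) + tri k
          = res + ((k : Int) + 1) * run + (tri k + ((k : Int) + 1)))]

theorem runLen_le (x : Int) (l : List Int) : runLen x l ≤ l.length := by
  induction l with
  | nil => simp [runLen]
  | cons v t ih => simp only [runLen, List.length_cons]; split <;> omega

-- resetting run is free when the list is empty or starts with a non-x
theorem csoGo_reset (x : Int) (rest : List Int)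
    (h : rest = [] ∨ ∃ v t, rest = v :: t ∧ v ≠ x) (run res : Int) :
    csoGo x rest run res = csoGo x rest 0 res := by
  rcases h with h | ⟨v, t, h, hv⟩
  · subst h; simp [csoGo]
  · subst h; simp [csoGo, hv]

-- characterisation of the inner loop: i + leading run length of drop i
theorem csoInner_eq (nums : List Int) (x : Int) (i : Int) (h0 : 0 ≤ i) (hn : i ≤ nums.length) :
    csoInner nums x nums.length i = i + runLen x (nums.drop i.toNat) := by
  rw [csoInner]
  by_cases hi : i < nums.length
  · have hget : PySem.List.pyGetD nums i 0 = nums[i.toNat] :=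
      PySem.List.pyGetD_eq_getElem nums 0 h0 hi
    have hdrop : nums.drop i.toNat = nums[i.toNat] :: nums.drop (i.toNat + 1) :=
      List.drop_eq_getElem_cons (by omega)
    by_cases hx : PySem.List.pyGetD nums i 0 = x
    · simp only [hi, hx, and_self, if_true]
      rw [csoInner_eq nums x (i + 1) (by omega) (by omega)]
      have : (i + 1).toNat = i.toNat + 1 := by omega
      rw [this, hdrop]
      simp only [runLen, hget ▸ hx, if_true]
      push_cast; ring
    · simp only [hi, hx, and_false, if_false]
      rw [hdrop]
      simp only [runLen, hget ▸ hx, if_false]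
      omega
  · simp only [hi, false_and, if_false]
    have : nums.drop i.toNat = [] := List.drop_eq_nil_of_le (by omega)
    simp [this, runLen]
termination_by (nums.length - i).toNat
decreasing_by omega

-- main invariant: the outer loop from index i equals B's flat pass on drop i with run = 0
theorem csoOuter_eq (nums : List Int) (x : Int) (i res : Int) (h0 : 0 ≤ i) (hn : i ≤ nums.length) :
    csoOuter nums x nums.length i res = csoGo x (nums.drop i.toNat) 0 res := by
  rw [csoOuter]
  by_cases hi : i < nums.length
  · have hget : PySem.List.pyGetD nums i 0 = nums[i.toNat] :=
      PySem.List.pyGetD_eq_getElem nums 0 h0 hi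
    have hdrop : nums.drop i.toNat = nums[i.toNat] :: nums.drop (i.toNat + 1) :=
      List.drop_eq_getElem_cons (by omega)
    rw [dif_pos hi]
    by_cases hx : PySem.List.pyGetD nums i 0 = x
    · rw [dif_neg (not_not_intro hx)]
      have hj : csoInner nums x nums.length i = i + runLen x (nums.drop i.toNat) :=
        csoInner_eq nums x i h0 hn
      have hdec := runLen_decomp x (nums.drop i.toNat)
      have hpos : 1 ≤ runLen x (nums.drop i.toNat) := by
        rw [hdrop]; simp [runLen, hget ▸ hx]
      set k := runLen x (nums.drop i.toNat) with hk
      have hle : k ≤ (nums.drop i.toNat).length := hk ▸ runLen_le x (nums.drop i.toNat)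
      have hlen : (nums.drop i.toNat).length = nums.length - i.toNat := by simp
      have hkn : i + (k : Int) ≤ nums.length := by omega
      have hrest : (nums.drop i.toNat).drop k = nums.drop (i + (k : Int)).toNat := by
        rw [List.drop_drop]; congr 1; omega
      simp only [hj]
      rw [csoOuter_eq nums x (i + k) _ (by omega) hkn]
      have harith : i + (k : Int) - i = (k : Int) := by ring
      rw [harith, tri_eq_floordiv k]
      conv_rhs => rw [hdec.1, csoGo_replicate]
      rw [csoGo_reset x _ hdec.2, hrest]
      congr 1; ring
    · rw [dif_pos hx]
      rw [csoOuter_eq nums x (i + 1) res (by omega) (by omega)]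
      have h1 : (i + 1).toNat = i.toNat + 1 := by omega
      rw [h1]
      conv_rhs => rw [hdrop]
      simp [csoGo, hget ▸ hx]
  · rw [dif_neg hi]
    have : nums.drop i.toNat = [] := List.drop_eq_nil_of_le (by omega)
    simp [this, csoGo]
termination_by (nums.length - i).toNat
decreasing_by all_goals omega

-- ===== VERDICT (by name: the statement is the Claim_ definition above) =====
theorem countSubarraysOne_spec : Claim_equal_countSubarraysOne := by
  intro nums x _
  unfold Spec_countSubarraysOne countSubarraysOne countSubarraysOne_alt
  have := csoOuter_eq nums x 0 0 le_rfl (by omega)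
  simpa using this
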